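-- pv_equiv track=rewrite | github.com/lehoangbaoduy/nysus_chatbot | nysus_chatbot.py | group_databases_and_tables
-- ===== SOURCE A (Python) =====
-- from typing import List, Dict
--
-- def group_databases_and_tables(matching_databases: List[Dict[str, str]]) -> Dict[str, List[str]]:
--     """
--     Group tables by their parent database.
--
--     Args:
--         matching_databases: List of dicts with 'database' and 'table' keys
--
--     Returns:
--         Dict mapping database names to lists of table names
--     """
--     grouped = {}
--     for item in matching_databases:
--         db_name = item.get("database", "Unknown")
--         table_name = item.get("table", "Unknown")
--
--         if db_name not in grouped:
--             grouped[db_name] = []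
--
--         # Only add unique tables
--         if table_name not in grouped[db_name]:
--             grouped[db_name].append(table_name)
--
--     # Sort tables alphabetically within each database
--     for db_name in grouped:
--         grouped[db_name].sort()
--
--     return grouped
-- ===== SOURCE B (Python) =====
-- def group_databases_and_tables(matching_databases):
--     pairs = [(item.get("database", "Unknown"), item.get("table", "Unknown"))
--              for item in matching_databases]
--     return {db: sorted({t for d, t in pairs if d == db}) for db, _ in pairs}
-- ===== Notes on version B (the rewrite author's own statement) =====
-- stated objective: idiomatic
-- what changed: Replaces the incremental dict-of-lists with membership dedup and an in-place sort pass by two comprehensions: build the (db, table) pairs once, then a dict comprehension mapping each database to sorted(set of its tables) selected by a per-key filter.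
import Mathlib
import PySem

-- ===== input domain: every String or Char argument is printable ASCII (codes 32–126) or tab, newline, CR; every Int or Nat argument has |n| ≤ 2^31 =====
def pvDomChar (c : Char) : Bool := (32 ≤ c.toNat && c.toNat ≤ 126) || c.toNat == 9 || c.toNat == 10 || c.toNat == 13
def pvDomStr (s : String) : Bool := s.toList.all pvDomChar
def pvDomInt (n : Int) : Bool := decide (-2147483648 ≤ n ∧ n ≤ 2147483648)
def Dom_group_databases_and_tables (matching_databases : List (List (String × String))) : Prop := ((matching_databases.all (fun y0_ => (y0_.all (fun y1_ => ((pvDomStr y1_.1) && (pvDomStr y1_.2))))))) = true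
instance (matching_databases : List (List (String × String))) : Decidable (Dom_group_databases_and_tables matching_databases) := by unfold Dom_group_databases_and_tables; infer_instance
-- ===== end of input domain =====

-- B replaces A's incremental dict-of-lists (membership dedup + in-place sort pass) by two
-- comprehensions: build the (db, table) pairs once, then map each database, in first-appearance
-- order, to sorted(set of its tables); objective: idiomatic, same results.


-- ===== PORT A =====
-- each input dict is an association list; item.get(k, dflt) is (PySem.Dict.mk item).getD k dflt;
-- the in-place grouped[db].sort() is modeled as overwriting the key with the sorted list
def group_databases_and_tables (matching_databases : List (List (String × String))) : List (String × List String) :=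
  let grouped := matching_databases.foldl (fun g item =>
    let db_name := (PySem.Dict.mk item).getD "database" "Unknown"
    let table_name := (PySem.Dict.mk item).getD "table" "Unknown"
    let g1 := if g.contains db_name then g else g.insert db_name []
    if (g1.getD db_name []).contains table_name then g1
    else g1.insert db_name (g1.getD db_name [] ++ [table_name])) PySem.Dict.empty
  let grouped2 := grouped.keys.foldl (fun g db_name =>
    g.insert db_name (PySem.List.sorted (g.getD db_name []) (fun x => x))) grouped
  grouped2.items

-- ===== PORT B =====
def group_databases_and_tables_alt (matching_databases : List (List (String × String))) : List (String × List String) :=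
  let pairs := matching_databases.map (fun item =>
    ((PySem.Dict.mk item).getD "database" "Unknown", (PySem.Dict.mk item).getD "table" "Unknown"))
  (pairs.foldl (fun d p =>
      d.insert p.1 (PySem.List.sorted (PySem.Set.ofList ((pairs.filter (fun q => q.1 == p.1)).map (·.2))) (fun x => x)))
    PySem.Dict.empty).items

-- ===== PRECONDITION & SPEC =====
def Spec_group_databases_and_tables (matching_databases : List (List (String × String))) (out : List (String × List String)) : Prop := out = group_databases_and_tables_alt matching_databases
instance (matching_databases : List (List (String × String))) (out : List (String × List String)) : Decidable (Spec_group_databases_and_tables matching_databases out) := by unfold Spec_group_databases_and_tables; infer_instance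

-- ===== CLAIM (what is proved, stated in full; the proofs are below) =====
def Claim_equal_group_databases_and_tables : Prop := ∀ (matching_databases : List (List (String × String))), Dom_group_databases_and_tables matching_databases → Spec_group_databases_and_tables matching_databases (group_databases_and_tables matching_databases)

-- ===== LEMMAS AND PROOFS =====

def pvStepP (g : PySem.Dict String (List String)) (p : String × String) : PySem.Dict String (List String) :=
  let g1 := if g.contains p.1 then g else g.insert p.1 []
  if (g1.getD p.1 []).contains p.2 then g1
  else g1.insert p.1 (g1.getD p.1 [] ++ [p.2])

def pvPair (item : List (String × String)) : String × String :=
  ((PySem.Dict.mk item).getD "database" "Unknown", (PySem.Dict.mk item).getD "table" "Unknown")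

def pvCanon (ps : List (String × String)) : List (String × List String) :=
  (PySem.Set.ofList (ps.map (·.1))).map (fun db =>
    (db, PySem.List.sorted (PySem.Set.ofList ((ps.filter (fun q => q.1 == db)).map (·.2))) (fun x => x)))

lemma pvSet_add_of_mem (s : PySem.Set String) (x : String) (h : x ∈ s) : s.add x = s := by
  simp [PySem.Set.add, PySem.Set.contains, h]

lemma pvSet_update_of_subset (s : PySem.Set String) (l : List String) (h : ∀ x ∈ l, x ∈ s) :
    PySem.Set.update s l = s := by
  induction l generalizing s with
  | nil => rfl
  | cons x l ih =>
      have hx : s.add x = s := pvSet_add_of_mem s x (h x (by simp))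
      show PySem.Set.update (s.add x) l = s
      rw [hx]
      exact ih s (fun y hy => h y (by simp [hy]))

lemma pvGetD_stepP (d : PySem.Dict String (List String)) (p : String × String) (c : String) :
    (pvStepP d p).getD c [] = if p.1 = c then PySem.Set.add (d.getD c []) p.2 else d.getD c [] := by
  unfold pvStepP
  by_cases hc : p.1 = c
  · subst hc
    by_cases h1 : d.contains p.1
    · simp only [h1, if_true]
      by_cases h2 : p.2 ∈ d.getD p.1 []
      · simp [PySem.Set.add, PySem.Set.contains, h2]
      · simp [PySem.Set.add, PySem.Set.contains, h2, PySem.Dict.getD_insert_self]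
    · have h1' : d.contains p.1 = false := by simpa using h1
      have hd0 : d.getD p.1 [] = ([] : List String) := by
        simp [PySem.Dict.getD_of_not_contains, h1']
      simp only [h1', Bool.false_eq_true, if_false]
      have hg : (d.insert p.1 []).getD p.1 [] = ([] : List String) := by
        simp [PySem.Dict.getD_insert_self]
      rw [hg]
      simp [PySem.Set.add, PySem.Set.contains, hd0, PySem.Dict.getD_insert_self]
  · have hcne : c ≠ p.1 := fun h => hc h.symm
    have hins : ∀ v : List String, (d.insert p.1 v).getD c [] = d.getD c [] := fun v => by
      simp [PySem.Dict.getD_insert, hcne]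
    by_cases h1 : d.contains p.1
    · simp only [h1, if_true]
      split_ifs with h2 <;> simp [hins]
    · have h1' : d.contains p.1 = false := by simpa using h1
      simp only [h1', Bool.false_eq_true, if_false]
      split_ifs with h2 <;> simp [PySem.Dict.insert_insert_self, hins]

lemma pvGetD_foldA (l : List (String × String)) (d : PySem.Dict String (List String)) (c : String) :
    ((l.foldl pvStepP d).getD c []) =
      PySem.Set.update (d.getD c []) ((l.filter (fun q => q.1 == c)).map (·.2)) := by
  induction l generalizing d with
  | nil => rfl
  | cons p l ih =>
      rw [List.foldl_cons, ih, pvGetD_stepP]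
      by_cases hc : p.1 = c
      · simp [hc]
      · simp [hc]

lemma pvKeys_stepP (d : PySem.Dict String (List String)) (p : String × String) :
    (pvStepP d p).keys = PySem.Set.add d.keys p.1 := by
  unfold pvStepP
  by_cases h1 : d.contains p.1
  · have hmem : p.1 ∈ d.keys := (PySem.Dict.contains_iff_mem_keys d p.1).mp h1
    have hadd : PySem.Set.add d.keys p.1 = d.keys := by
      simp [PySem.Set.add, PySem.Set.contains, hmem]
    simp only [h1, if_true]
    split_ifs with h2
    · exact hadd.symm
    · rw [PySem.Dict.keys_insert_of_contains (h := h1), hadd]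
  · have h1' : d.contains p.1 = false := by simpa using h1
    have hnm : p.1 ∉ d.keys := fun hm => by
      simp [(PySem.Dict.contains_iff_mem_keys d p.1).mpr hm] at h1'
    have hadd : PySem.Set.add d.keys p.1 = d.keys ++ [p.1] := by
      simp [PySem.Set.add, PySem.Set.contains, hnm]
    simp only [h1', Bool.false_eq_true, if_false]
    have hk1 : (d.insert p.1 []).keys = d.keys ++ [p.1] :=
      PySem.Dict.keys_insert_of_not_contains d [] h1'
    have hc2 : (d.insert p.1 []).contains p.1 = true := PySem.Dict.contains_insert_self d p.1 []
    split_ifs with h2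
    · rw [hk1, hadd]
    · rw [PySem.Dict.keys_insert_of_contains (h := hc2), hk1, hadd]

lemma pvKeys_foldA (l : List (String × String)) (d : PySem.Dict String (List String)) :
    (l.foldl pvStepP d).keys = PySem.Set.update d.keys (l.map (·.1)) := by
  induction l generalizing d with
  | nil => rfl
  | cons p l ih =>
      rw [List.foldl_cons, ih, pvKeys_stepP]
      rfl

lemma pvGetD_sortLoop (ks : List String) (hk : ks.Nodup) (d : PySem.Dict String (List String)) (c : String) :
    ((ks.foldl (fun g k => g.insert k (PySem.List.sorted (g.getD k []) (fun x => x))) d).getD c []) =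
      if c ∈ ks then PySem.List.sorted (d.getD c []) (fun x => x) else d.getD c [] := by
  induction ks generalizing d with
  | nil => simp
  | cons k ks ih =>
      obtain ⟨hkn, hknd⟩ := List.nodup_cons.mp hk
      rw [List.foldl_cons, ih hknd]
      by_cases hck : c = k
      · subst hck
        simp [hkn, PySem.Dict.getD_insert_self]
      · simp [hck, PySem.Dict.getD_insert_of_ne _ _ _ hck]

lemma pvGetD_foldB (V : String → List String) (l : List (String × String))
    (d : PySem.Dict String (List String)) (c : String) :
    ((l.foldl (fun g p => g.insert p.1 (V p.1)) d).getD c []) =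
      if c ∈ l.map (·.1) then V c else d.getD c [] := by
  induction l generalizing d with
  | nil => simp
  | cons p l ih =>
      rw [List.foldl_cons, ih]
      by_cases hcp : c = p.1
      · subst hcp
        have hins : (d.insert p.1 (V p.1)).getD p.1 [] = V p.1 := by
          simp [PySem.Dict.getD_insert_self]
        rw [hins, ite_self]
        simp
      · by_cases hm : c ∈ l.map (·.1) <;>
          simp [hm, hcp, PySem.Dict.getD_insert_of_ne _ _ _ hcp]

lemma pvA_eq_canon (md : List (List (String × String))) :
    group_databases_and_tables md = pvCanon (md.map pvPair) := by
  unfold group_databases_and_tables pvCanon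
  have hfold : (md.foldl (fun g item =>
      let db_name := (PySem.Dict.mk item).getD "database" "Unknown"
      let table_name := (PySem.Dict.mk item).getD "table" "Unknown"
      let g1 := if g.contains db_name then g else g.insert db_name []
      if (g1.getD db_name []).contains table_name then g1
      else g1.insert db_name (g1.getD db_name [] ++ [table_name])) PySem.Dict.empty)
      = (md.map pvPair).foldl pvStepP PySem.Dict.empty := by
    rw [List.foldl_map]
    rfl
  rw [hfold]
  set ps := md.map pvPair with hps
  set G1 := ps.foldl pvStepP PySem.Dict.empty with hG1
  have hkeys1 : G1.keys = PySem.Set.ofList (ps.map (·.1)) := by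
    rw [hG1, pvKeys_foldA]
    simp [PySem.Set.update_nil_left]
  have hnd1 : G1.keys.Nodup := by rw [hkeys1]; exact PySem.Set.nodup_ofList _
  set G2 := G1.keys.foldl (fun g db_name =>
      g.insert db_name (PySem.List.sorted (g.getD db_name []) (fun x => x))) G1 with hG2
  have hkeys2 : G2.keys = G1.keys := by
    rw [hG2, PySem.Dict.keys_foldl_insert]
    exact pvSet_update_of_subset _ _ (fun x hx => hx)
  have hnd2 : G2.keys.Nodup := hkeys2 ▸ hnd1
  rw [PySem.Dict.items_eq_map_keys G2 hnd2 [], hkeys2, hkeys1]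
  apply List.map_congr_left
  intro k hk
  have hkmem : k ∈ G1.keys := hkeys1 ▸ hk
  have h2 : G2.getD k [] = PySem.List.sorted (G1.getD k []) (fun x => x) := by
    rw [hG2, pvGetD_sortLoop G1.keys hnd1]
    simp [hkmem]
  have h1 : G1.getD k [] = PySem.Set.ofList ((ps.filter (fun q => q.1 == k)).map (·.2)) := by
    rw [hG1, pvGetD_foldA]
    simp [PySem.Set.update_nil_left, PySem.Dict.getD_empty]
  rw [h2, h1]

lemma pvB_eq_canon (md : List (List (String × String))) :
    group_databases_and_tables_alt md = pvCanon (md.map pvPair) := by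
  unfold group_databases_and_tables_alt pvCanon
  set ps := md.map pvPair with hps
  have hsame : md.map (fun item =>
      ((PySem.Dict.mk item).getD "database" "Unknown", (PySem.Dict.mk item).getD "table" "Unknown"))
      = ps := rfl
  rw [hsame]
  set V : String → List String := fun db =>
    PySem.List.sorted (PySem.Set.ofList ((ps.filter (fun q => q.1 == db)).map (·.2))) (fun x => x) with hV
  set D := ps.foldl (fun d p => d.insert p.1 (V p.1)) PySem.Dict.empty with hD
  have hkeys : D.keys = PySem.Set.ofList (ps.map (·.1)) := by
    rw [hD, PySem.Dict.keys_foldl_insert_key]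
    simp [PySem.Set.update_nil_left]
  have hnd : D.keys.Nodup := by rw [hkeys]; exact PySem.Set.nodup_ofList _
  rw [PySem.Dict.items_eq_map_keys D hnd [], hkeys]
  apply List.map_congr_left
  intro k hk
  have hk' : k ∈ ps.map (·.1) := by simpa using hk
  rw [hD, pvGetD_foldB]
  simp [hk', hV]

-- ===== VERDICT (by name: the statement is the Claim_ definition above) =====
theorem group_databases_and_tables_spec : Claim_equal_group_databases_and_tables := by
  intro md _
  show _ = _
  rw [pvA_eq_canon, pvB_eq_canon]
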